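-- pv_equiv track=rewrite | github.com/sfneal/dirutility | dirutility/permissions.py | octal_permissions_mode
-- ===== SOURCE A (Python) =====
-- def octal_permissions_mode(user=(False, False, False), group=(False, False, False), other=(False, False, False)):
--     """
--     Create a permissions bit in absolute notation (octal).
--
--     The user, group and other parameters are tuples representing Read, Write and Execute values.
--     All are set disallowed (set to false) by default and can be individually permitted.
--
--     :param user: User permissions
--     :param group: Group permissions
--     :param other: Other permissions
--     :return: Permissions bit
--     """
--     # Create single digit code for each name
--     mode = ''
--     for name in (user, group, other):
--         read, write, execute = name
--
--         # Execute
--         if execute and not all(i for i in (read, write)):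
--             code = 1
--
--         # Write
--         elif write and not all(i for i in (read, execute)):
--             code = 2
--
--         # Write & Execute
--         elif all(i for i in (write, execute)) and not read:
--             code = 3
--
--         # Read
--         elif read and not all(i for i in (write, execute)):
--             code = 4
--
--         # Read & Execute
--         elif all(i for i in (read, execute)) and not write:
--             code = 5
--
--         # Read & Write
--         elif all(i for i in (read, write)) and not execute:
--             code = 6
--
--         # Read, Write & Execute
--         elif all(i for i in (read, write, execute)):
--             code = 7
--         else:
--             code = 0
--         mode += str(code)
--     return int(mode)
-- ===== SOURCE B (Python) =====
-- def octal_permissions_mode(user=(False, False, False), group=(False, False, False), other=(False, False, False)):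
--     # Compose the result arithmetically (no string building / int parsing).
--     # Digit rule matches A's chain: 7 only when all three flags are set,
--     # otherwise the single highest-priority flag wins (execute > write > read).
--     def digit(name):
--         read, write, execute = name
--         if read and write and execute:
--             return 7
--         if execute:
--             return 1
--         if write:
--             return 2
--         if read:
--             return 4
--         return 0
--     return digit(user) * 100 + digit(group) * 10 + digit(other)
-- ===== Notes on version B (the rewrite author's own statement) =====
-- stated objective: simpler
-- what changed: B replaces A's string accumulation, 8-way if/elif chain with all() generator scans, and final int() parse by a prioritized digit function (7 if all flags, else execute>write>read weight) composed arithmetically as d(user)*100+d(group)*10+d(other).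
import Mathlib
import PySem

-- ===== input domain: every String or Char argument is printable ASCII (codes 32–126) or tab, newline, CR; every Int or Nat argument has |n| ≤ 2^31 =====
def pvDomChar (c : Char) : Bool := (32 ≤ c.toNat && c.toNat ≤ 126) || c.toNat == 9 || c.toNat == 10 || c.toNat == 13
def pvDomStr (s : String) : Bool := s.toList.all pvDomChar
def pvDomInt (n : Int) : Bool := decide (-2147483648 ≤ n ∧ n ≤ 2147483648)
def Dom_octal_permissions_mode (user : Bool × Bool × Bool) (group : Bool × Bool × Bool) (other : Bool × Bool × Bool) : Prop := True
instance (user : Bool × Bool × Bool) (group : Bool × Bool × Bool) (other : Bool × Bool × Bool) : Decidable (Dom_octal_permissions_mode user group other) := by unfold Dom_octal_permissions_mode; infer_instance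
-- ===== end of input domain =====

-- ===== PORT A =====
-- digit of one (read, write, execute) triple, A's if/elif chain step for step
-- (all(i for i in (a, b)) on booleans = a && b)
def pvACode (name : Bool × Bool × Bool) : Int :=
  let read := name.1; let write := name.2.1; let execute := name.2.2
  if execute && !(read && write) then 1
  else if write && !(read && execute) then 2
  else if (write && execute) && !read then 3
  else if read && !(write && execute) then 4
  else if (read && execute) && !write then 5
  else if (read && write) && !execute then 6
  else if read && write && execute then 7
  else 0

def octal_permissions_mode (user : Bool × Bool × Bool) (group : Bool × Bool × Bool) (other : Bool × Bool × Bool) : Int :=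
  -- mode = ''; for name in (user, group, other): mode += str(code); return int(mode)
  let mode := [user, group, other].foldl (fun mode name => mode ++ PySem.Int.toStr (pvACode name)) ""
  -- int(mode) always succeeds here (mode is three decimal digits), so getD 0 is never the default
  (PySem.Int.ofStr? mode).getD 0

-- ===== PORT B =====
def pvBDigit (name : Bool × Bool × Bool) : Int :=
  let read := name.1; let write := name.2.1; let execute := name.2.2
  if read && write && execute then 7
  else if execute then 1
  else if write then 2
  else if read then 4
  else 0

def octal_permissions_mode_alt (user : Bool × Bool × Bool) (group : Bool × Bool × Bool) (other : Bool × Bool × Bool) : Int :=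
  pvBDigit user * 100 + pvBDigit group * 10 + pvBDigit other
-- ===== PRECONDITION & SPEC =====
def Spec_octal_permissions_mode (user : Bool × Bool × Bool) (group : Bool × Bool × Bool) (other : Bool × Bool × Bool) (out : Int) : Prop := out = octal_permissions_mode_alt user group other
instance (user : Bool × Bool × Bool) (group : Bool × Bool × Bool) (other : Bool × Bool × Bool) (out : Int) : Decidable (Spec_octal_permissions_mode user group other out) := by unfold Spec_octal_permissions_mode; infer_instance

-- ===== CLAIM (what is proved, stated in full; the proofs are below) =====
def Claim_equal_octal_permissions_mode : Prop := ∀ (user : Bool × Bool × Bool) (group : Bool × Bool × Bool) (other : Bool × Bool × Bool), Dom_octal_permissions_mode user group other → Spec_octal_permissions_mode user group other (octal_permissions_mode user group other)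

-- ===== LEMMAS AND PROOFS =====

-- ===== VERDICT (by name: the statement is the Claim_ definition above) =====
theorem octal_permissions_mode_spec : Claim_equal_octal_permissions_mode := by
  unfold Claim_equal_octal_permissions_mode; decide
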